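-- pv_equiv track=rewrite | github.com/tsarkr/docent | scripts/tag_tei_with_dict.py | _split_xml_segments
-- ===== SOURCE A (Python) =====
-- def _split_xml_segments(text):
--     segments = []
--     buf = ''
--     in_tag = False
--     for ch in text:
--         if ch == '<':
--             if buf:
--                 segments.append((buf, in_tag))
--                 buf = ''
--             in_tag = True
--             buf += ch
--         elif ch == '>':
--             buf += ch
--             segments.append((buf, in_tag))
--             buf = ''
--             in_tag = False
--         else:
--             buf += ch
--     if buf:
--         segments.append((buf, in_tag))
--     return segments
-- ===== SOURCE B (Python) =====
-- def _split_xml_segments(text):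
--     segs = []
--     i, n = 0, len(text)
--     while i < n:
--         started_tag = text[i] == '<'
--         j = i + 1 if started_tag else i
--         while j < n and text[j] != '<' and text[j] != '>':
--             j += 1
--         if j < n and text[j] == '>':
--             j += 1
--         segs.append((text[i:j], started_tag))
--         i = j
--     return segs
-- ===== Notes on version B (the rewrite author's own statement) =====
-- stated objective: alternative
-- what changed: Replaced the character-by-character state machine carrying (segments, buf, in_tag) with a two-pointer scanner that finds each segment's end index directly and emits a slice, deriving the flag from the segment's first character.
import Mathlib
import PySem

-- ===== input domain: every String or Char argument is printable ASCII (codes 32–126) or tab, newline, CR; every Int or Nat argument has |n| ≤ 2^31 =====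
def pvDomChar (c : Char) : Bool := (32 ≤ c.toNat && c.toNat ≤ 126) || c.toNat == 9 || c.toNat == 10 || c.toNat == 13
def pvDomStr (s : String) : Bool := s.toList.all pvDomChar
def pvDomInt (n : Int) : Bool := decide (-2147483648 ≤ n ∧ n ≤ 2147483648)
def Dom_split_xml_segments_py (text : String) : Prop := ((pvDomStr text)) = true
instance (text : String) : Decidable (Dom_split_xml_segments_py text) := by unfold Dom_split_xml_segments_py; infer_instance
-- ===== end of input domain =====

-- B replaces A's buffer/flag state machine by a two-pointer scanner that locates each
-- segment's end directly and emits it as a slice (objective: alternative structure, same O(n) cost).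

-- ===== PORT A =====
-- A's for-loop over characters, carrying (segments, buf, in_tag); buffers are List Char,
-- turned into String at the end (Python's `buf += ch` is `buf ++ [c]`).
def pvALoop : List Char → List (List Char × Bool) → List Char → Bool → List (List Char × Bool)
  | [], segs, buf, tag => if buf.isEmpty then segs else segs ++ [(buf, tag)]
  | c :: cs, segs, buf, tag =>
    if c = '<' then
      pvALoop cs (if buf.isEmpty then segs else segs ++ [(buf, tag)]) [c] true
    else if c = '>' then
      pvALoop cs (segs ++ [(buf ++ [c], tag)]) [] false
    else
      pvALoop cs segs (buf ++ [c]) tag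

def split_xml_segments_py (text : String) : List (String × Bool) :=
  (pvALoop text.toList [] [] false).map (fun p => (String.mk p.1, p.2))

-- ===== PORT B =====
-- "not a bracket": the condition of Source B's inner scanning loop
def pvNB (c : Char) : Bool := !(c = '<' || c = '>')

-- Source B's `j = i + 1 if started_tag else i`: the part of the input the inner while scans
def pvSeek (c : Char) (rest : List Char) : List Char := if c = '<' then rest else c :: rest

-- termination facts for pvBGo (cited in decreasing_by)
theorem pvSeek_drop_le (c : Char) (rest : List Char) :
    ((pvSeek c rest).dropWhile pvNB).length ≤ rest.length + 1 := by
  have h := List.length_dropWhile_le pvNB (pvSeek c rest)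
  by_cases hc : c = '<' <;> simp [pvSeek, hc] at h ⊢ <;> omega

theorem pvSeek_drop_lt (c : Char) (rest : List Char)
    (h : ¬ ((pvSeek c rest).dropWhile pvNB).head? = some '>') :
    ((pvSeek c rest).dropWhile pvNB).length ≤ rest.length := by
  by_cases hc : c = '<'
  · simpa [pvSeek, hc] using List.length_dropWhile_le pvNB rest
  · by_cases hnb : pvNB c = true
    · rw [pvSeek, if_neg hc, List.dropWhile_cons, if_pos hnb]
      exact List.length_dropWhile_le pvNB rest
    · exfalso
      have hcg : c = '>' := by simp [pvNB, hc] at hnb; exact hnb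
      apply h
      rw [pvSeek, if_neg hc, List.dropWhile_cons, if_neg (by simp [hnb]), hcg]
      rfl

-- Source B's outer while loop: each step takes one segment off the front — optional leading
-- '<' (`j = i+1`), the run of non-bracket chars (the inner while = takeWhile/dropWhile),
-- an optional closing '>' (`if j < n and text[j] == '>'` = the head? test) — and
-- recurses on the remainder; `text[i:j]` is the emitted prefix.
def pvBGo : List Char → List (List Char × Bool)
  | [] => []
  | c :: rest =>
    if h : ((pvSeek c rest).dropWhile pvNB).head? = some '>' then
      ((if c = '<' then [c] else []) ++ (pvSeek c rest).takeWhile pvNB ++ ['>'], c = '<')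
        :: pvBGo ((pvSeek c rest).dropWhile pvNB).tail
    else
      ((if c = '<' then [c] else []) ++ (pvSeek c rest).takeWhile pvNB, c = '<')
        :: pvBGo ((pvSeek c rest).dropWhile pvNB)
  termination_by cs => cs.length
  decreasing_by
  · have h1 := pvSeek_drop_le c rest
    have hne : (pvSeek c rest).dropWhile pvNB ≠ [] := by intro he; rw [he] at h; simp at h
    have h2 : 0 < ((pvSeek c rest).dropWhile pvNB).length := List.length_pos_iff.mpr hne
    simp only [List.length_tail, List.length_cons]
    omega
  · have h1 := pvSeek_drop_lt c rest h
    simp only [List.length_cons]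
    omega

def split_xml_segments_py_alt (text : String) : List (String × Bool) :=
  (pvBGo text.toList).map (fun p => (String.mk p.1, p.2))

-- ===== PRECONDITION & SPEC =====
def Spec_split_xml_segments_py (text : String) (out : List (String × Bool)) : Prop := out = split_xml_segments_py_alt text
instance (text : String) (out : List (String × Bool)) : Decidable (Spec_split_xml_segments_py text out) := by unfold Spec_split_xml_segments_py; infer_instance

-- ===== CLAIM (what is proved, stated in full; the proofs are below) =====
def Claim_equal_split_xml_segments_py : Prop := ∀ (text : String), Dom_split_xml_segments_py text → Spec_split_xml_segments_py text (split_xml_segments_py text)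

-- ===== LEMMAS AND PROOFS =====

-- "continue the current segment": B's view of A's pending state (buf, tag)
def pvCont (buf : List Char) (tag : Bool) (cs : List Char) : List (List Char × Bool) :=
  if (cs.dropWhile pvNB).head? = some '>' then
    (buf ++ cs.takeWhile pvNB ++ ['>'], tag) :: pvBGo (cs.dropWhile pvNB).tail
  else if buf ++ cs.takeWhile pvNB = [] then pvBGo (cs.dropWhile pvNB)
  else (buf ++ cs.takeWhile pvNB, tag) :: pvBGo (cs.dropWhile pvNB)

-- one-step unfoldings of A's loop
theorem pvALoop_lt (cs : List Char) (segs : List (List Char × Bool)) (buf : List Char) (tag : Bool) :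
    pvALoop ('<' :: cs) segs buf tag
      = pvALoop cs (if buf.isEmpty then segs else segs ++ [(buf, tag)]) ['<'] true := by
  simp [pvALoop]

theorem pvALoop_gt (cs : List Char) (segs : List (List Char × Bool)) (buf : List Char) (tag : Bool) :
    pvALoop ('>' :: cs) segs buf tag
      = pvALoop cs (segs ++ [(buf ++ ['>'], tag)]) [] false := by
  simp [pvALoop]

theorem pvALoop_nb (c : Char) (cs : List Char) (segs : List (List Char × Bool)) (buf : List Char)
    (tag : Bool) (h1 : ¬ c = '<') (h2 : ¬ c = '>') :
    pvALoop (c :: cs) segs buf tag = pvALoop cs segs (buf ++ [c]) tag := by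
  simp [pvALoop, h1, h2]

theorem pvALoop_accum (cs : List Char) : ∀ segs buf tag,
    pvALoop cs segs buf tag = segs ++ pvALoop cs [] buf tag := by
  induction cs with
  | nil => intro segs buf tag; by_cases h : buf.isEmpty <;> simp [pvALoop, h]
  | cons c cs ih =>
    intro segs buf tag
    by_cases h1 : c = '<'
    · subst h1
      rw [pvALoop_lt, pvALoop_lt]
      rw [ih, ih (if buf.isEmpty = true then [] else [] ++ [(buf, tag)])]
      by_cases hb : buf.isEmpty <;> simp [hb]
    · by_cases h2 : c = '>'
      · subst h2
        rw [pvALoop_gt, pvALoop_gt]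
        rw [ih, ih ([] ++ [(buf ++ ['>'], tag)])]
        simp
      · rw [pvALoop_nb c cs segs buf tag h1 h2, pvALoop_nb c cs [] buf tag h1 h2]
        exact ih segs (buf ++ [c]) tag

theorem pvBGo_lt (cs : List Char) : pvBGo ('<' :: cs) = pvCont ['<'] true cs := by
  rw [pvBGo]
  unfold pvCont
  by_cases h : ((cs.dropWhile pvNB)).head? = some '>' <;> simp [pvSeek, h]

theorem pvBGo_start (cs : List Char) : pvCont [] false cs = pvBGo cs := by
  match cs with
  | [] => simp [pvCont, pvBGo]
  | c :: rest =>
    by_cases hc : c = '<'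
    · subst hc
      unfold pvCont
      simp [pvNB]
    · rw [pvBGo]
      unfold pvCont
      have hseek : pvSeek c rest = c :: rest := by simp [pvSeek, hc]
      by_cases h : ((c :: rest).dropWhile pvNB).head? = some '>'
      · simp [hseek, hc, h]
      · have hnb : pvNB c = true := by
          by_contra hn
          have hcg : c = '>' := by simp [pvNB, hc] at hn; exact hn
          apply h
          rw [List.dropWhile_cons, if_neg (by simp [pvNB, hcg]), hcg]
          rfl
        have hm : (c :: rest).takeWhile pvNB ≠ [] := by
          rw [List.takeWhile_cons, if_pos hnb]; simp
        simp [hseek, hc, h, hm]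

theorem pvMain (cs : List Char) : ∀ buf tag,
    pvALoop cs [] buf tag = pvCont buf tag cs := by
  induction cs with
  | nil =>
    intro buf tag
    by_cases hb : buf = [] <;>
      simp [pvALoop, pvCont, pvBGo, hb]
  | cons c cs ih =>
    intro buf tag
    by_cases h1 : c = '<'
    · subst h1
      rw [pvALoop_lt, pvALoop_accum, ih, ← pvBGo_lt]
      unfold pvCont
      by_cases hb : buf = [] <;> simp [hb, pvNB, List.isEmpty_iff]
    · by_cases h2 : c = '>'
      · subst h2
        rw [pvALoop_gt, pvALoop_accum, ih, pvBGo_start]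
        unfold pvCont
        simp [pvNB]
      · have hnb : pvNB c = true := by simp [pvNB, h1, h2]
        rw [pvALoop_nb c cs [] buf tag h1 h2, ih]
        unfold pvCont
        rw [List.takeWhile_cons, if_pos hnb, List.dropWhile_cons, if_pos hnb]
        split_ifs <;> simp_all [List.append_assoc]

-- ===== VERDICT (by name: the statement is the Claim_ definition above) =====
theorem split_xml_segments_py_spec : Claim_equal_split_xml_segments_py := by
  intro text _
  unfold Spec_split_xml_segments_py split_xml_segments_py split_xml_segments_py_alt
  rw [pvMain, pvBGo_start]
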